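-- pv_equiv track=rewrite | github.com/dvidbruhm/advent-of-code-2024 | days/day12.py | get_perim
-- ===== SOURCE A (Python) =====
-- def get_perim(visited):
--     perim = 0
--     for x, y in visited:
--         perim += 1 if (x + 1, y) not in visited else 0
--         perim += 1 if (x - 1, y) not in visited else 0
--         perim += 1 if (x, y + 1) not in visited else 0
--         perim += 1 if (x, y - 1) not in visited else 0
--     return perim
-- ===== SOURCE B (Python) =====
-- def get_perim(visited):
--     cells = set(visited)
--     edges = 0
--     for x, y in cells:
--         if (x + 1, y) in cells:
--             edges += 1
--         if (x, y + 1) in cells: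
--             edges += 1
--     return 4 * len(cells) - 2 * edges
-- ===== Notes on version B (the rewrite author's own statement) =====
-- stated objective: faster
-- what changed: Instead of testing all four neighbours of every cell against the list, B builds a hash set once and counts each internal shared edge exactly once (only the +x and +y neighbours), returning 4*n - 2*edges.
import Mathlib
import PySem

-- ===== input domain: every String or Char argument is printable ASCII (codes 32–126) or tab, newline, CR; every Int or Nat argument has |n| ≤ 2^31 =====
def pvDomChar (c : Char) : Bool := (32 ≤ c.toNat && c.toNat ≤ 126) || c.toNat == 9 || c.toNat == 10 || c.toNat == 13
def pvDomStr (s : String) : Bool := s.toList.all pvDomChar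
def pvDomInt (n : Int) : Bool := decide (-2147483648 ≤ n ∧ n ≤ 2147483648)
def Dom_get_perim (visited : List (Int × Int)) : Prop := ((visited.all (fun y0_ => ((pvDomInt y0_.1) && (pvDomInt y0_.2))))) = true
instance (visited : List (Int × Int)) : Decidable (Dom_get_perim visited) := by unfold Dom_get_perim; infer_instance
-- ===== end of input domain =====

-- B replaces A's quadratic four-neighbour list scan by a hash set and counts each shared
-- internal edge once (forward neighbours only), returning 4*n - 2*edges: asymptotically faster.


-- ===== PORT A =====
def get_perim (visited : List (Int × Int)) : Int :=
  visited.foldl (fun perim p =>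
    perim + (if (p.1 + 1, p.2) ∈ visited then (0 : Int) else 1)
          + (if (p.1 - 1, p.2) ∈ visited then (0 : Int) else 1)
          + (if (p.1, p.2 + 1) ∈ visited then (0 : Int) else 1)
          + (if (p.1, p.2 - 1) ∈ visited then (0 : Int) else 1)) 0

-- ===== PORT B =====
def get_perim_alt (visited : List (Int × Int)) : Int :=
  let cells : PySem.Set (Int × Int) := PySem.Set.ofList visited
  let edges : Int := cells.foldl (fun edges p =>
    (edges + (if (p.1 + 1, p.2) ∈ cells then (1 : Int) else 0))
           + (if (p.1, p.2 + 1) ∈ cells then (1 : Int) else 0)) 0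
  4 * (cells.length : Int) - 2 * edges

-- ===== PRECONDITION & SPEC =====
-- Pre_ excludes lists with duplicate cells: `visited` is meant to be a set of cells, and on
-- duplicates A's repeated per-occurrence counting is as accidental as B's deduplicated count.
def Pre_get_perim (visited : List (Int × Int)) : Prop := visited.Nodup
instance (visited : List (Int × Int)) : Decidable (Pre_get_perim visited) := by unfold Pre_get_perim; infer_instance
def pvWitness_get_perim : (List (Int × Int)) := [(0, 0), (1, 0), (1, 1)]
def Spec_get_perim (visited : List (Int × Int)) (out : Int) : Prop := out = get_perim_alt visited
instance (visited : List (Int × Int)) (out : Int) : Decidable (Spec_get_perim visited out) := by unfold Spec_get_perim; infer_instance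

-- ===== CLAIM (what is proved, stated in full; the proofs are below) =====
def Claim_equal_get_perim : Prop := ∀ (visited : List (Int × Int)), Dom_get_perim visited → Pre_get_perim visited → Spec_get_perim visited (get_perim visited)

-- ===== LEMMAS AND PROOFS =====

-- fold of "accumulator plus a per-element contribution" is the sum of the contributions
theorem pv_foldl_add_sum (w : (Int × Int) → Int) (l : List (Int × Int)) (init : Int) :
    l.foldl (fun acc x => acc + w x) init = init + (l.map w).sum := by
  induction l generalizing init with
  | nil => simp
  | cons a t ih => simp [List.foldl_cons, ih]; ring

theorem pv_sum_add {α : Type} (l : List α) (f g : α → Int) :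
    (l.map (fun x => f x + g x)).sum = (l.map f).sum + (l.map g).sum := by
  induction l with
  | nil => simp
  | cons a t ih => simp [ih]; ring

theorem pv_sum_sub {α : Type} (l : List α) (f g : α → Int) :
    (l.map (fun x => f x - g x)).sum = (l.map f).sum - (l.map g).sum := by
  induction l with
  | nil => simp
  | cons a t ih => simp [ih]; ring

theorem pv_sum_const {α : Type} (l : List α) :
    (l.map (fun _ => (1 : Int))).sum = (l.length : Int) := by
  induction l with
  | nil => simp
  | cons a t ih => simp; ring

-- sum of the +d membership indicators equals sum of the -d indicators (shift bijection)
theorem pv_shift_sum (l : List (Int × Int)) (h : l.Nodup) (dx dy : Int) :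
    (l.map (fun p => if (p.1 + dx, p.2 + dy) ∈ l then (1 : Int) else 0)).sum
      = (l.map (fun p => if (p.1 - dx, p.2 - dy) ∈ l then (1 : Int) else 0)).sum := by
  rw [← List.sum_toFinset _ h, ← List.sum_toFinset _ h]
  have hmem : ∀ q : Int × Int, q ∈ l ↔ q ∈ l.toFinset := by
    intro q; simp [List.mem_toFinset]
  simp only [hmem]
  rw [Finset.sum_boole, Finset.sum_boole]
  congr 1
  apply Finset.card_nbij' (i := fun p => (p.1 + dx, p.2 + dy)) (j := fun p => (p.1 - dx, p.2 - dy))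
  · intro p hp
    simp only [Finset.mem_coe, Finset.mem_filter] at hp ⊢
    exact ⟨hp.2, by simpa using hp.1⟩
  · intro p hp
    simp only [Finset.mem_coe, Finset.mem_filter] at hp ⊢
    exact ⟨hp.2, by simpa using hp.1⟩
  · intro p _; simp
  · intro p _; simp

theorem get_perim_eq_sum (l : List (Int × Int)) :
    get_perim l = (l.map (fun p =>
      (if (p.1 + 1, p.2) ∈ l then (0 : Int) else 1)
      + (if (p.1 - 1, p.2) ∈ l then (0 : Int) else 1)
      + (if (p.1, p.2 + 1) ∈ l then (0 : Int) else 1)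
      + (if (p.1, p.2 - 1) ∈ l then (0 : Int) else 1))).sum := by
  unfold get_perim
  rw [show (fun (perim : Int) (p : Int × Int) =>
      perim + (if (p.1 + 1, p.2) ∈ l then (0 : Int) else 1)
            + (if (p.1 - 1, p.2) ∈ l then (0 : Int) else 1)
            + (if (p.1, p.2 + 1) ∈ l then (0 : Int) else 1)
            + (if (p.1, p.2 - 1) ∈ l then (0 : Int) else 1))
    = (fun acc p => acc + ((if (p.1 + 1, p.2) ∈ l then (0 : Int) else 1)
      + (if (p.1 - 1, p.2) ∈ l then (0 : Int) else 1)
      + (if (p.1, p.2 + 1) ∈ l then (0 : Int) else 1)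
      + (if (p.1, p.2 - 1) ∈ l then (0 : Int) else 1))) from by funext acc p; ring]
  rw [pv_foldl_add_sum]; ring

theorem get_perim_alt_eq_sum (l : List (Int × Int)) (h : l.Nodup) :
    get_perim_alt l = 4 * (l.length : Int)
      - 2 * (l.map (fun p => (if (p.1 + 1, p.2) ∈ l then (1 : Int) else 0)
                           + (if (p.1, p.2 + 1) ∈ l then (1 : Int) else 0))).sum := by
  simp only [get_perim_alt]
  rw [PySem.Set.ofList_eq_self_of_nodup (xs := l) h]
  rw [show (fun (edges : Int) (p : Int × Int) =>
      (edges + (if (p.1 + 1, p.2) ∈ l then (1 : Int) else 0))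
             + (if (p.1, p.2 + 1) ∈ l then (1 : Int) else 0))
    = (fun acc p => acc + ((if (p.1 + 1, p.2) ∈ l then (1 : Int) else 0)
      + (if (p.1, p.2 + 1) ∈ l then (1 : Int) else 0))) from by funext acc p; ring]
  rw [pv_foldl_add_sum]; ring

-- ===== VERDICT (by name: the statement is the Claim_ definition above) =====
theorem get_perim_spec : Claim_equal_get_perim := by
  intro l _ h
  unfold Spec_get_perim
  rw [get_perim_eq_sum, get_perim_alt_eq_sum l h]
  have flip : ∀ c : Prop, ∀ inst : Decidable c,
      (if c then (0 : Int) else 1) = 1 - (if c then (1 : Int) else 0) := by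
    intro c inst; split <;> ring
  simp only [flip]
  rw [pv_sum_add, pv_sum_add, pv_sum_add,
      pv_sum_sub, pv_sum_sub, pv_sum_sub, pv_sum_sub, pv_sum_const, pv_sum_add]
  have hL : (l.map (fun p => if (p.1 - 1, p.2) ∈ l then (1 : Int) else 0)).sum
      = (l.map (fun p => if (p.1 + 1, p.2) ∈ l then (1 : Int) else 0)).sum := by
    have := pv_shift_sum l h 1 0
    simp only [add_zero, sub_zero] at this
    exact this.symm
  have hD : (l.map (fun p => if (p.1, p.2 - 1) ∈ l then (1 : Int) else 0)).sum
      = (l.map (fun p => if (p.1, p.2 + 1) ∈ l then (1 : Int) else 0)).sum := by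
    have := pv_shift_sum l h 0 1
    simp only [add_zero, sub_zero] at this
    exact this.symm
  rw [hL, hD]; ring
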